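-- pv_equiv track=rewrite | github.com/jebt/kattis | problems/cudoviste.py | solve
-- ===== SOURCE A (Python) =====
-- def solve(problem_input: str):
--     lines = problem_input.splitlines()
--     grid = []
--     for line in lines[1::]:
--         grid.append(list(line))
--
--     c0, c1, c2, c3, c4 = 0, 0, 0, 0, 0
--     for y, row in enumerate(grid[:-1]):
--         for x, col in enumerate(row[:-1]):
--             spot = row[x] + row[x + 1] + grid[y + 1][x] + grid[y + 1][x + 1]
--             if "#" in spot:
--                 continue
--             number_of_cars = spot.count("X")
--             if number_of_cars == 0:
--                 c0 += 1
--             elif number_of_cars == 1: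
--                 c1 += 1
--             elif number_of_cars == 2:
--                 c2 += 1
--             elif number_of_cars == 3:
--                 c3 += 1
--             else:
--                 c4 += 1
--
--     return f"{c0}\n{c1}\n{c2}\n{c3}\n{c4}"
-- ===== SOURCE B (Python) =====
-- def solve(problem_input: str):
--     grid = problem_input.splitlines()[1:]
--     # Prefix-sum tables: for each row, hp[y][i] / xp[y][i] = number of '#' / 'X'
--     # among the first i characters.  Each 2x2 block is then classified with four
--     # O(1) range queries instead of building and scanning a 4-char string.
--     hp = []
--     xp = []
--     for row in grid:
--         h = [0]
--         x = [0]
--         for ch in row: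
--             h.append(h[-1] + (ch == '#'))
--             x.append(x[-1] + (ch == 'X'))
--         hp.append(h)
--         xp.append(x)
--     counts = [0] * 5
--     for y in range(len(grid) - 1):
--         hy, hy1, xy, xy1 = hp[y], hp[y + 1], xp[y], xp[y + 1]
--         for x in range(len(grid[y]) - 1):
--             if hy[x + 2] - hy[x] + hy1[x + 2] - hy1[x] == 0:
--                 counts[xy[x + 2] - xy[x] + xy1[x + 2] - xy1[x]] += 1
--     return "\n".join(map(str, counts))
-- ===== Notes on version B (the rewrite author's own statement) =====
-- stated objective: alternative
-- what changed: B replaces A's per-block 4-char string building with substring scan and count by per-row prefix-sum tables of '#' and 'X' built once, classifying each 2x2 block with O(1) prefix-difference range queries into a length-5 counts array.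
import Mathlib
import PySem

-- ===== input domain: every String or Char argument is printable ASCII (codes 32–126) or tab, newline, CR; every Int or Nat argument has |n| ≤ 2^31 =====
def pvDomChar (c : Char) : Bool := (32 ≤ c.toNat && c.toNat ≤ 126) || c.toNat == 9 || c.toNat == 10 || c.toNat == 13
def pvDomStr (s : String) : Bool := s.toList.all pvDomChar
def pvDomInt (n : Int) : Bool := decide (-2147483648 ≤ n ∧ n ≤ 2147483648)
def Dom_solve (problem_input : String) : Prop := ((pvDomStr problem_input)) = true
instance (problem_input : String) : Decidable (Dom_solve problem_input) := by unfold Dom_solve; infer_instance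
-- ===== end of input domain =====

-- B builds per-row prefix-sum tables of '#' and 'X' once and classifies every 2x2 block
-- with O(1) prefix-difference range queries (no per-block 4-char string); same O(rows*cols) cost.

-- ===== PORT A =====
-- the body of A's inner loop, verbatim: spot = row[x]+row[x+1]+grid[y+1][x]+grid[y+1][x+1];
-- "#" in spot (len-1 substring = membership); spot.count("X"); the if/elif chain on the 5 counters
def pvStepA (cs : Int × Int × Int × Int × Int) (a b c d : Char) : Int × Int × Int × Int × Int :=
  let spot : List Char := [a, b, c, d]
  if '#' ∈ spot then cs
  else
    let n := spot.count 'X'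
    if n = 0 then (cs.1 + 1, cs.2.1, cs.2.2.1, cs.2.2.2.1, cs.2.2.2.2)
    else if n = 1 then (cs.1, cs.2.1 + 1, cs.2.2.1, cs.2.2.2.1, cs.2.2.2.2)
    else if n = 2 then (cs.1, cs.2.1, cs.2.2.1 + 1, cs.2.2.2.1, cs.2.2.2.2)
    else if n = 3 then (cs.1, cs.2.1, cs.2.2.1, cs.2.2.2.1 + 1, cs.2.2.2.2)
    else (cs.1, cs.2.1, cs.2.2.1, cs.2.2.2.1, cs.2.2.2.2 + 1)

def solve (problem_input : String) : String :=
  let lines := PySem.Str.splitlines problem_input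
  -- grid.append(list(line)) over lines[1::]
  let grid : List (List Char) :=
    (PySem.List.slice lines (some 1) none).foldl (fun g line => g ++ [line.toList]) []
  let cs :=
    (PySem.List.enumerate (PySem.List.slice grid none (some (-1))) 0).foldl (fun cs yrow =>
      (PySem.List.enumerate (PySem.List.slice yrow.2 none (some (-1))) 0).foldl (fun cs xcol =>
        -- pyGetD is exact here: Pre_solve excludes the IndexError inputs
        pvStepA cs (PySem.List.pyGetD yrow.2 xcol.1 ' ') (PySem.List.pyGetD yrow.2 (xcol.1 + 1) ' ')
          (PySem.List.pyGetD (PySem.List.pyGetD grid (yrow.1 + 1) []) xcol.1 ' ')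
          (PySem.List.pyGetD (PySem.List.pyGetD grid (yrow.1 + 1) []) (xcol.1 + 1) ' ')) cs)
      ((0, 0, 0, 0, 0) : Int × Int × Int × Int × Int)
  -- f"{c0}\n{c1}\n{c2}\n{c3}\n{c4}" is exactly "\n".join of the five str(ci)
  PySem.Str.join "\n" [PySem.Int.toStr cs.1, PySem.Int.toStr cs.2.1, PySem.Int.toStr cs.2.2.1,
    PySem.Int.toStr cs.2.2.2.1, PySem.Int.toStr cs.2.2.2.2]

-- ===== PORT B =====
-- the per-row prefix loop of Source B: h = [0]; x = [0]; for ch in row: h.append(h[-1] + (ch=='#')); x.append(x[-1] + (ch=='X'))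
def pvPrefs (r : List Char) : List Int × List Int :=
  r.foldl (fun hx ch =>
    (hx.1 ++ [PySem.List.pyGetD hx.1 (-1) 0 + (if ch = '#' then 1 else 0)],
     hx.2 ++ [PySem.List.pyGetD hx.2 (-1) 0 + (if ch = 'X' then 1 else 0)])) ([0], [0])

-- counts[i] += 1
def pvBump (cs : List Int) (i : Int) : List Int :=
  PySem.List.pySetD cs i (PySem.List.pyGetD cs i 0 + 1)

def solve_alt (problem_input : String) : String :=
  let grid := PySem.List.slice (PySem.Str.splitlines problem_input) (some 1) none
  -- hp.append(h); xp.append(x) over the rows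
  let hpxp := grid.foldl (fun acc row =>
      let hx := pvPrefs row.toList
      (acc.1 ++ [hx.1], acc.2 ++ [hx.2])) (([], []) : List (List Int) × List (List Int))
  let hp := hpxp.1
  let xp := hpxp.2
  let counts := (PySem.List.pyRange 0 (PySem.List.len grid - 1) 1).foldl (fun counts y =>
      let hy := PySem.List.pyGetD hp y []
      let hy1 := PySem.List.pyGetD hp (y + 1) []
      let xy := PySem.List.pyGetD xp y []
      let xy1 := PySem.List.pyGetD xp (y + 1) []
      (PySem.List.pyRange 0 (PySem.Str.len (PySem.List.pyGetD grid y "") - 1) 1).foldl (fun counts x =>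
        if PySem.List.pyGetD hy (x + 2) 0 - PySem.List.pyGetD hy x 0
            + PySem.List.pyGetD hy1 (x + 2) 0 - PySem.List.pyGetD hy1 x 0 = 0
        then pvBump counts (PySem.List.pyGetD xy (x + 2) 0 - PySem.List.pyGetD xy x 0
            + PySem.List.pyGetD xy1 (x + 2) 0 - PySem.List.pyGetD xy1 x 0)
        else counts) counts)
    ([0, 0, 0, 0, 0] : List Int)
  PySem.Str.join "\n" (counts.map (fun c => PySem.Int.toStr c))

-- ===== PRECONDITION & SPEC =====
-- Pre_solve excludes exactly the ragged grids on which A raises IndexError: a row of width ≥ 2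
-- followed by a strictly shorter row (A indexes the next row up to the current row's width).
def Pre_solve (problem_input : String) : Prop :=
  List.IsChain (fun t b => 2 ≤ t.length → t.length ≤ b.length)
    ((PySem.Str.splitlines problem_input).tail.map (fun line => line.toList))
instance (problem_input : String) : Decidable (Pre_solve problem_input) := by
  unfold Pre_solve; infer_instance

def pvWitness_solve : String := "2 3\nXX.\n..#"

def Spec_solve (problem_input : String) (out : String) : Prop := out = solve_alt problem_input
instance (problem_input : String) (out : String) : Decidable (Spec_solve problem_input out) := by
  unfold Spec_solve; infer_instance

-- ===== CLAIM (what is proved, stated in full; the proofs are below) =====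
def Claim_equal_solve : Prop := ∀ (problem_input : String), Dom_solve problem_input →
  Pre_solve problem_input → Spec_solve problem_input (solve problem_input)

-- ===== LEMMAS AND PROOFS =====

-- '#'/'X' indicators and the common per-block step both loops reduce to
def pvH (c : Char) : Int := if c = '#' then 1 else 0
def pvX (c : Char) : Int := if c = 'X' then 1 else 0

def pvCStep (counts : List Int) (q : (Char × Char) × (Char × Char)) : List Int :=
  if pvH q.1.1 + pvH q.1.2 + pvH q.2.1 + pvH q.2.2 = 0
  then pvBump counts (pvX q.1.1 + pvX q.1.2 + pvX q.2.1 + pvX q.2.2) else counts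

def pvCBody (counts : List Int) (p : List Char × List Char) : List Int :=
  ((p.1.zip (p.1.drop 1)).zip (p.2.zip (p.2.drop 1))).foldl pvCStep counts

-- proof-side names for A's loop bodies
def pvListify (cs : Int × Int × Int × Int × Int) : List Int :=
  [cs.1, cs.2.1, cs.2.2.1, cs.2.2.2.1, cs.2.2.2.2]

def pvABody (cs : Int × Int × Int × Int × Int) (p : List Char × List Char) :
    Int × Int × Int × Int × Int :=
  (PySem.List.enumerate p.1.dropLast 0).foldl (fun cs xc =>
    pvStepA cs (PySem.List.pyGetD p.1 xc.1 ' ') (PySem.List.pyGetD p.1 (xc.1 + 1) ' ')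
      (PySem.List.pyGetD p.2 xc.1 ' ') (PySem.List.pyGetD p.2 (xc.1 + 1) ' ')) cs

theorem pvGetD_append_len {α : Type} (pre : List α) (x : α) (rest : List α) (d : α) :
    PySem.List.pyGetD (pre ++ x :: rest) ((pre.length : Int)) d = x := by
  rw [PySem.List.pyGetD_natCast]
  simp [List.getD_eq_getElem?_getD]

theorem pvGetD_append_len1 {α : Type} (pre : List α) (x y : α) (rest : List α) (d : α) :
    PySem.List.pyGetD (pre ++ x :: y :: rest) ((pre.length : Int) + 1) d = y := by
  rw [show ((pre.length : Int) + 1) = (((pre ++ [x]).length : Nat) : Int) by simp]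
  rw [show pre ++ x :: y :: rest = (pre ++ [x]) ++ y :: rest by simp]
  exact pvGetD_append_len (pre ++ [x]) y rest d

-- an index-based window loop is the fold over the zipped adjacent pairs
theorem pvIdx2aux {α S : Type} (step : α → α → α → α → S → S) (d : α) :
    ∀ (t b tp bp : List α), tp.length = bp.length → t.length ≤ b.length → ∀ (s : S),
    (PySem.List.enumerate t.dropLast ((tp.length : Nat) : Int)).foldl
      (fun s p => step (PySem.List.pyGetD (tp ++ t) p.1 d) (PySem.List.pyGetD (tp ++ t) (p.1+1) d)
                       (PySem.List.pyGetD (bp ++ b) p.1 d) (PySem.List.pyGetD (bp ++ b) (p.1+1) d) s) s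
    = ((t.zip (t.drop 1)).zip (b.zip (b.drop 1))).foldl (fun s q => step q.1.1 q.1.2 q.2.1 q.2.2 s) s := by
  intro t
  induction t with
  | nil => intro b tp bp _ h s; simp [PySem.List.enumerate_nil]
  | cons a t ih =>
    intro b tp bp hlen h s
    cases t with
    | nil => simp [PySem.List.enumerate_nil]
    | cons a' t' =>
      match b with
      | [] => simp at h
      | [c] => simp at h
      | c :: d' :: b'' =>
        rw [show (a :: a' :: t').dropLast = a :: (a'::t').dropLast from rfl]
        rw [PySem.List.enumerate_cons, List.foldl_cons]
        rw [pvGetD_append_len tp a, pvGetD_append_len1 tp a a']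
        rw [show ((tp.length : Nat) : Int) = ((bp.length : Nat) : Int) by rw [hlen]]
        rw [pvGetD_append_len bp c, pvGetD_append_len1 bp c d']
        simp only [show tp ++ a :: a' :: t' = (tp ++ [a]) ++ a' :: t' by simp,
                   show bp ++ c :: d' :: b'' = (bp ++ [c]) ++ d' :: b'' by simp]
        rw [show ((bp.length : Nat) : Int) + 1 = (((tp ++ [a]).length : Nat) : Int) by simp [hlen]]
        rw [ih (d' :: b'') (tp ++ [a]) (bp ++ [c]) (by simp [hlen]) (by simpa using h)]
        simp [List.zip_cons_cons]

theorem pvIdx2 {α S : Type} (step : α → α → α → α → S → S) (d : α)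
    (t b : List α) (h : t.length ≤ b.length) (s : S) :
    (PySem.List.enumerate t.dropLast 0).foldl
      (fun s p => step (PySem.List.pyGetD t p.1 d) (PySem.List.pyGetD t (p.1+1) d)
                       (PySem.List.pyGetD b p.1 d) (PySem.List.pyGetD b (p.1+1) d) s) s
    = ((t.zip (t.drop 1)).zip (b.zip (b.drop 1))).foldl (fun s q => step q.1.1 q.1.2 q.2.1 q.2.2 s) s := by
  simpa using pvIdx2aux step d t b [] [] rfl h s

theorem pvZipSelf {α : Type} (l : List α) : l.zip l = l.map (fun x => (x, x)) := by
  induction l with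
  | nil => rfl
  | cons x t ih => simp [List.zip_cons_cons, ih]

-- the two per-block steps agree through pvListify
set_option maxHeartbeats 1000000 in
theorem pvStep_eq (a b c d : Char) (cs : Int × Int × Int × Int × Int) :
    pvListify (pvStepA cs a b c d) = pvCStep (pvListify cs) ((a, b), (c, d)) := by
  obtain ⟨c0, c1, c2, c3, c4⟩ := cs
  by_cases ha : a = '#' <;> by_cases hb : b = '#' <;> by_cases hc : c = '#' <;> by_cases hd : d = '#' <;>
    by_cases xa : a = 'X' <;> by_cases xb : b = 'X' <;> by_cases xc : c = 'X' <;> by_cases xd : d = 'X' <;>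
    simp_all [pvStepA, pvCStep, pvH, pvX, pvBump, pvListify,
      PySem.List.pySetD, PySem.List.pySet?, PySem.List.pyGetD, PySem.List.pyGet?, PySem.List.pyIdx?] <;>
    simp_all [eq_comm]

theorem pvBlkFold (blk : List ((Char × Char) × (Char × Char))) :
    ∀ (cs : Int × Int × Int × Int × Int),
    pvListify (blk.foldl (fun s q => pvStepA s q.1.1 q.1.2 q.2.1 q.2.2) cs)
    = blk.foldl pvCStep (pvListify cs) := by
  induction blk with
  | nil => intro cs; rfl
  | cons q blk ih =>
    intro cs
    rw [List.foldl_cons, List.foldl_cons, ih, pvStep_eq]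

theorem pvInner_eq (t b : List Char) (h : 2 ≤ t.length → t.length ≤ b.length)
    (cs : Int × Int × Int × Int × Int) :
    pvListify (pvABody cs (t, b)) = pvCBody (pvListify cs) (t, b) := by
  by_cases ht : 2 ≤ t.length
  · unfold pvABody pvCBody
    rw [pvIdx2 (fun w x y z cs => pvStepA cs w x y z) ' ' t b (h ht)]
    exact pvBlkFold _ cs
  · cases t with
    | nil => simp [pvABody, pvCBody, PySem.List.enumerate_nil]
    | cons a t2 =>
      cases t2 with
      | nil => simp [pvABody, pvCBody, PySem.List.enumerate_nil]
      | cons a2 t3 => exact absurd (by simp) ht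

theorem pvZipFold (z : List (List Char × List Char))
    (hz : ∀ p ∈ z, 2 ≤ p.1.length → p.1.length ≤ p.2.length) :
    ∀ (cs : Int × Int × Int × Int × Int),
    pvListify (z.foldl pvABody cs) = z.foldl pvCBody (pvListify cs) := by
  induction z with
  | nil => intro cs; rfl
  | cons p z ih =>
    intro cs
    rw [List.foldl_cons, List.foldl_cons,
        ih (fun q hq => hz q (List.mem_cons_of_mem _ hq))]
    congr 1
    obtain ⟨t, b⟩ := p
    exact pvInner_eq t b (hz (t, b) (List.mem_cons_self)) cs

theorem pvChainMem {α : Type} {R : α → α → Prop} :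
    ∀ {l : List α}, List.IsChain R l → ∀ p ∈ l.zip l.tail, R p.1 p.2 := by
  intro l
  induction l with
  | nil => intro _ p hp; simp at hp
  | cons a t ih =>
    intro h p hp
    cases t with
    | nil => simp at hp
    | cons b t' =>
      rw [List.isChain_cons_cons] at h
      rcases (List.mem_cons).1 hp with rfl | hp'
      · exact h.1
      · exact ih h.2 p hp'

-- ===== B-side: the prefix lists and their range queries =====
-- running prefix sums of f starting from accumulated value a
def pvRun (f : Char → Int) : Int → List Char → List Int
  | _, [] => []
  | a, c :: r => (a + f c) :: pvRun f (a + f c) r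

theorem pvPrefAux :
    ∀ (r : List Char) (acc1 acc2 : List Int) (a1 a2 : Int),
    r.foldl (fun hx ch =>
        (hx.1 ++ [PySem.List.pyGetD hx.1 (-1) 0 + (if ch = '#' then 1 else 0)],
         hx.2 ++ [PySem.List.pyGetD hx.2 (-1) 0 + (if ch = 'X' then 1 else 0)]))
      (acc1 ++ [a1], acc2 ++ [a2])
    = (acc1 ++ [a1] ++ pvRun pvH a1 r, acc2 ++ [a2] ++ pvRun pvX a2 r) := by
  intro r
  induction r with
  | nil => intro acc1 acc2 a1 a2; simp [pvRun]
  | cons c r ih =>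
    intro acc1 acc2 a1 a2
    rw [List.foldl_cons]
    simp only [PySem.List.pyGetD_neg_one_append_singleton]
    rw [ih (acc1 ++ [a1]) (acc2 ++ [a2]) (a1 + if c = '#' then 1 else 0) (a2 + if c = 'X' then 1 else 0)]
    simp [pvRun, pvH, pvX]

theorem pvPrefs_eq (r : List Char) :
    pvPrefs r = (0 :: pvRun pvH 0 r, 0 :: pvRun pvX 0 r) := by
  unfold pvPrefs
  simpa using pvPrefAux r [] [] 0 0

theorem pvRun_getD (f : Char → Int) :
    ∀ (r : List Char) (a : Int) (k : Nat), k < r.length →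
    (pvRun f a r).getD k 0 = a + ((r.take (k + 1)).map f).sum := by
  intro r
  induction r with
  | nil => intro a k hk; simp at hk
  | cons c r ih =>
    intro a k hk
    cases k with
    | zero => simp [pvRun]
    | succ k =>
      rw [show pvRun f a (c :: r) = (a + f c) :: pvRun f (a + f c) r from rfl]
      rw [List.getD_cons_succ, ih (a + f c) k (by simpa using hk)]
      simp [List.take_succ_cons]
      ring

theorem pvPref_getD (f : Char → Int) (t : List Char) (k : Nat) (hk : k ≤ t.length) :
    (0 :: pvRun f 0 t).getD k 0 = ((t.take k).map f).sum := by
  cases k with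
  | zero => simp
  | succ k =>
    rw [List.getD_cons_succ, pvRun_getD f t 0 k (by omega)]
    simp

theorem pvPref_diff (f : Char → Int) (t : List Char) (k : Nat) (hk : k + 2 ≤ t.length) :
    (0 :: pvRun f 0 t).getD (k + 2) 0 - (0 :: pvRun f 0 t).getD k 0
    = f (t.getD k ' ') + f (t.getD (k + 1) ' ') := by
  rw [pvPref_getD f t (k + 2) hk, pvPref_getD f t k (by omega)]
  have h1 : k < t.length := by omega
  have h2 : k + 1 < t.length := by omega
  have e2 : t.take (k + 2) = t.take k ++ [t[k], t[k + 1]] := by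
    rw [show k + 2 = (k + 1) + 1 from rfl, List.take_add_one, List.take_add_one,
      List.getElem?_eq_getElem h2, List.getElem?_eq_getElem h1]
    simp only [Option.toList_some, List.append_assoc, List.cons_append, List.nil_append]
  rw [e2, List.map_append, List.sum_append]
  have g1 : t.getD k ' ' = t[k] := by
    simp [List.getD_eq_getElem?_getD, List.getElem?_eq_getElem h1]
  have g2 : t.getD (k + 1) ' ' = t[k + 1] := by
    simp [List.getD_eq_getElem?_getD, List.getElem?_eq_getElem h2]
  rw [g1, g2]
  simp

-- B's inner prefix-query loop over x equals the fold over the zipped adjacent char pairs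
theorem pvBInner (t b : List Char) (h : 2 ≤ t.length → t.length ≤ b.length) (counts : List Int) :
    (PySem.List.pyRange 0 ((t.length : Int) - 1) 1).foldl (fun counts x =>
      if PySem.List.pyGetD (0 :: pvRun pvH 0 t) (x + 2) 0 - PySem.List.pyGetD (0 :: pvRun pvH 0 t) x 0
          + PySem.List.pyGetD (0 :: pvRun pvH 0 b) (x + 2) 0 - PySem.List.pyGetD (0 :: pvRun pvH 0 b) x 0 = 0
      then pvBump counts (PySem.List.pyGetD (0 :: pvRun pvX 0 t) (x + 2) 0 - PySem.List.pyGetD (0 :: pvRun pvX 0 t) x 0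
          + PySem.List.pyGetD (0 :: pvRun pvX 0 b) (x + 2) 0 - PySem.List.pyGetD (0 :: pvRun pvX 0 b) x 0)
      else counts) counts
    = pvCBody counts (t, b) := by
  by_cases ht : 2 ≤ t.length
  · have hb : t.length ≤ b.length := h ht
    rw [PySem.List.pyRange_one, List.foldl_map,
      show (((t.length : Int) - 1) - 0).toNat = t.length - 1 by omega]
    refine (PySem.List.foldl_congr_mem' _ _
      (fun counts k => pvCStep counts ((t.getD k ' ', t.getD (k + 1) ' '),
        (b.getD k ' ', b.getD (k + 1) ' '))) _ ?_).trans ?_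
    · intro k hk counts
      simp only [List.mem_range] at hk
      have dH1 := pvPref_diff pvH t k (by omega)
      have dH2 := pvPref_diff pvH b k (by omega)
      have dX1 := pvPref_diff pvX t k (by omega)
      have dX2 := pvPref_diff pvX b k (by omega)
      simp only [zero_add, show ((k : Nat) : Int) + 2 = (((k + 2 : Nat) : Nat) : Int) by push_cast; ring,
        PySem.List.pyGetD_natCast]
      rw [show ∀ (a0 a1 b0 b1 : Int), a1 - a0 + b1 - b0 = (a1 - a0) + (b1 - b0) from by intros; ring]
      rw [show ∀ (a0 a1 b0 b1 : Int), a1 - a0 + b1 - b0 = (a1 - a0) + (b1 - b0) from by intros; ring]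
      rw [dH1, dH2, dX1, dX2]
      simp [pvCStep, add_assoc]
    · have hmap : (List.range (t.length - 1)).map
          (fun k => ((t.getD k ' ', t.getD (k + 1) ' '), (b.getD k ' ', b.getD (k + 1) ' ')))
          = (t.zip (t.drop 1)).zip (b.zip (b.drop 1)) := by
        apply List.ext_getElem
        · simp; omega
        · intro i h1 h2
          have hit : i < t.length - 1 := by simpa using h1
          have ht1 : i < t.length := by omega
          have ht2 : i + 1 < t.length := by omega
          have hb1 : i < b.length := by omega
          have hb2 : i + 1 < b.length := by omega
          simp [List.getElem_zip, ht1, ht2, hb1, hb2]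
      unfold pvCBody
      dsimp only
      rw [← hmap, List.foldl_map]
  · have hz : t.zip t.tail = [] := by
      cases t with
      | nil => rfl
      | cons a t2 =>
        cases t2 with
        | nil => rfl
        | cons a2 t3 => exact absurd (by simp) ht
    unfold pvCBody
    rw [PySem.List.pyRange_one_eq_nil (by omega : (t.length : Int) - 1 ≤ 0)]
    simp [hz]

-- hp.append/xp.append over the rows is a pair of maps
theorem pvPairApp {α β γ : Type} (f : α → β) (g : α → γ) :
    ∀ (l : List α) (acc1 : List β) (acc2 : List γ),
    l.foldl (fun acc row => (acc.1 ++ [f row], acc.2 ++ [g row])) (acc1, acc2)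
    = (acc1 ++ l.map f, acc2 ++ l.map g) := by
  intro l
  induction l with
  | nil => intro acc1 acc2; simp
  | cons r l ih =>
    intro acc1 acc2
    rw [List.foldl_cons, ih (acc1 ++ [f r]) (acc2 ++ [g r])]
    simp

-- ===== VERDICT (by name: the statement is the Claim_ definition above) =====
theorem solve_spec : Claim_equal_solve := by
  intro s _ hpre
  show solve s = solve_alt s
  unfold solve solve_alt
  simp only [PySem.List.slice_from_one, PySem.List.slice_to_neg_one,
             PySem.List.foldl_append_singleton_eq_map, List.nil_append,
             PySem.List.len_eq]
  rw [pvPairApp (fun row => (pvPrefs row.toList).1) (fun row => (pvPrefs row.toList).2)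
      (PySem.Str.splitlines s).tail [] []]
  simp only [List.nil_append]
  have hz : ∀ p ∈ (List.map String.toList (PySem.Str.splitlines s).tail).zip
      (List.map String.toList (PySem.Str.splitlines s).tail).tail,
      2 ≤ p.1.length → p.1.length ≤ p.2.length := pvChainMem hpre
  have hidx : ∀ (i : Nat), i + 1 < (List.map String.toList (PySem.Str.splitlines s).tail).length →
      (2 ≤ ((List.map String.toList (PySem.Str.splitlines s).tail).getD i []).length →
       ((List.map String.toList (PySem.Str.splitlines s).tail).getD i []).length ≤
       ((List.map String.toList (PySem.Str.splitlines s).tail).getD (i + 1) []).length) := by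
    intro i hi
    have h := List.isChain_iff_getElem.mp hpre i hi
    rw [List.getD_eq_getElem?_getD, List.getD_eq_getElem?_getD,
      List.getElem?_eq_getElem hi,
      List.getElem?_eq_getElem
        (show i < (List.map String.toList (PySem.Str.splitlines s).tail).length by omega),
      Option.getD_some, Option.getD_some]
    exact h
  generalize hL : (PySem.Str.splitlines s).tail = L at hz hidx ⊢
  generalize hG : List.map String.toList L = G at hz hidx ⊢
  -- A side: express the row bound by enumerate through an index lookup into G
  rw [PySem.List.foldl_congr_mem' (PySem.List.enumerate G.dropLast 0) _
      (fun cs yrow =>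
        (PySem.List.enumerate ((PySem.List.pyGetD G yrow.1 ([] : List Char)).dropLast) 0).foldl
          (fun cs xcol => pvStepA cs
            (PySem.List.pyGetD (PySem.List.pyGetD G yrow.1 []) xcol.1 ' ')
            (PySem.List.pyGetD (PySem.List.pyGetD G yrow.1 []) (xcol.1 + 1) ' ')
            (PySem.List.pyGetD (PySem.List.pyGetD G (yrow.1 + 1) []) xcol.1 ' ')
            (PySem.List.pyGetD (PySem.List.pyGetD G (yrow.1 + 1) []) (xcol.1 + 1) ' ')) cs)
      (0, 0, 0, 0, 0) ?hrow]
  -- A side: the enumerate/index loop is the fold over zipped adjacent row pairs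
  rw [pvIdx2 (fun w x _ _ s =>
        (PySem.List.enumerate w.dropLast 0).foldl
          (fun cs xcol => pvStepA cs
            (PySem.List.pyGetD w xcol.1 ' ') (PySem.List.pyGetD w (xcol.1 + 1) ' ')
            (PySem.List.pyGetD x xcol.1 ' ') (PySem.List.pyGetD x (xcol.1 + 1) ' ')) s)
      ([] : List Char) G G le_rfl]
  rw [pvZipSelf (G.zip (G.drop 1)), List.foldl_map]
  simp only [List.drop_one]
  rw [show ∀ cs : Int × Int × Int × Int × Int,
      [PySem.Int.toStr cs.1, PySem.Int.toStr cs.2.1, PySem.Int.toStr cs.2.2.1,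
       PySem.Int.toStr cs.2.2.2.1, PySem.Int.toStr cs.2.2.2.2]
      = (pvListify cs).map (fun c => PySem.Int.toStr c) from fun cs => rfl]
  rw [show (fun (s : Int × Int × Int × Int × Int) (x : List Char × List Char) =>
        (PySem.List.enumerate x.1.dropLast 0).foldl
          (fun cs xcol => pvStepA cs
            (PySem.List.pyGetD x.1 xcol.1 ' ') (PySem.List.pyGetD x.1 (xcol.1 + 1) ' ')
            (PySem.List.pyGetD x.2 xcol.1 ' ') (PySem.List.pyGetD x.2 (xcol.1 + 1) ' ')) s)
      = pvABody from rfl]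
  rw [pvZipFold (G.zip G.tail) hz]
  -- B side: the prefix-query loops over y
  have hGL : L.length = G.length := by
    rw [← hG]; simp only [List.length_map]
  rw [PySem.List.pyRange_one, List.foldl_map,
    show (((L.length : Int) - 1) - 0).toNat
      = L.length - 1 by omega]
  rw [PySem.List.foldl_congr_mem' (List.range (L.length - 1)) _
      (fun counts k => pvCBody counts (G.getD k [], G.getD (k + 1) []))
      ([0, 0, 0, 0, 0]) ?hcol]
  · -- fold over indices = fold over zipped adjacent rows
    have hmap2 : (List.range (L.length - 1)).map
        (fun k => (G.getD k [], G.getD (k + 1) [])) = G.zip G.tail := by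
      apply List.ext_getElem
      · simp [hGL]
      · intro i h1 h2
        have hi : i < G.length - 1 := by simpa [hGL] using h1
        have hi1 : i < G.length := by omega
        have hi2 : i + 1 < G.length := by omega
        simp [List.getElem_zip, List.getD_eq_getElem?_getD,
          List.getElem?_eq_getElem hi1, List.getElem?_eq_getElem hi2, List.getElem_tail]
    rw [← hmap2, List.foldl_map]
    rfl
  case hcol =>
    intro k hk counts
    simp only [List.mem_range] at hk
    have hk1 : k < L.length := by omega
    have hk2 : k + 1 < L.length := by omega
    have hg1 : G.getD k [] = L[k].toList := by
      rw [← hG]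
      simp [List.getD_eq_getElem?_getD, List.getElem?_eq_getElem hk1]
    have hg2 : G.getD (k + 1) [] = L[k + 1].toList := by
      rw [← hG]
      simp [List.getD_eq_getElem?_getD, List.getElem?_eq_getElem hk2]
    have hcond : 2 ≤ L[k].toList.length →
        L[k].toList.length ≤ L[k + 1].toList.length := by
      have h := hidx k (by omega)
      rw [hg1, hg2] at h
      exact h
    have e1 : PySem.List.pyGetD (L.map (fun row => (pvPrefs row.toList).1))
        ((k : Nat) : Int) [] = 0 :: pvRun pvH 0 (L[k].toList) := by
      simp [List.getD_eq_getElem?_getD, List.getElem?_eq_getElem hk1, pvPrefs_eq]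
    have e2 : PySem.List.pyGetD (L.map (fun row => (pvPrefs row.toList).1))
        (((k : Nat) : Int) + 1) [] = 0 :: pvRun pvH 0 (L[k + 1].toList) := by
      rw [show ((k : Nat) : Int) + 1 = (((k + 1 : Nat) : Nat) : Int) by push_cast; ring,
        PySem.List.pyGetD_natCast]
      simp [List.getD_eq_getElem?_getD, List.getElem?_eq_getElem hk2, pvPrefs_eq]
    have e3 : PySem.List.pyGetD (L.map (fun row => (pvPrefs row.toList).2))
        ((k : Nat) : Int) [] = 0 :: pvRun pvX 0 (L[k].toList) := by
      simp [List.getD_eq_getElem?_getD, List.getElem?_eq_getElem hk1, pvPrefs_eq]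
    have e4 : PySem.List.pyGetD (L.map (fun row => (pvPrefs row.toList).2))
        (((k : Nat) : Int) + 1) [] = 0 :: pvRun pvX 0 (L[k + 1].toList) := by
      rw [show ((k : Nat) : Int) + 1 = (((k + 1 : Nat) : Nat) : Int) by push_cast; ring,
        PySem.List.pyGetD_natCast]
      simp [List.getD_eq_getElem?_getD, List.getElem?_eq_getElem hk2, pvPrefs_eq]
    have e5 : PySem.Str.len (PySem.List.pyGetD L ((k : Nat) : Int) "")
        = ((L[k].toList.length : Nat) : Int) := by
      simp [PySem.Str.len_eq, List.getD_eq_getElem?_getD, List.getElem?_eq_getElem hk1]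
    simp only [zero_add]
    rw [e1, e2, e3, e4, e5]
    rw [pvBInner _ _ hcond counts]
    rw [hg1, hg2]
  case hrow =>
    intro p hp cs
    rcases (PySem.List.mem_enumerate_iff _ _ _).1 hp with ⟨k, hk, rfl⟩
    have hk' : k < G.length := lt_of_lt_of_le hk (by simp [List.length_dropLast])
    have hget : PySem.List.pyGetD G ((0:Int) + (k : Int)) ([] : List Char) = G.dropLast[k] := by
      simp [PySem.List.pyGetD_natCast, List.getD_eq_getElem?_getD,
        List.getElem?_eq_getElem hk', List.getElem_dropLast]
    simp only [hget]
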